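-- pv_equiv track=rewrite | github.com/ben-aaron188/textwash | anonymizer.py | get_entity_type_mapping
-- ===== SOURCE A (Python) =====
-- def get_entity_type_mapping(entities):
--     entity2generic_c = {v: 1 for _, v in entities.items()}
--     entity2generic = {}
--
--     for phrase, entity_type in entities.items():
--         entity2generic[phrase] = "{}_{}".format(
--             entity_type, entity2generic_c[entity_type]
--         )
--         entity2generic_c[entity_type] += 1
--
--     return entity2generic
-- ===== SOURCE B (Python) =====
-- def get_entity_type_mapping(entities):
--     # Stage 1: group the phrases by entity type (encounter order preserved).
--     groups = {}
--     for phrase, entity_type in entities.items():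
--         groups.setdefault(entity_type, []).append(phrase)
--     # Stage 2: number each group's phrases once with enumerate, into a label index.
--     label = {}
--     for entity_type, phrases in groups.items():
--         for i, phrase in enumerate(phrases, start=1):
--             label[phrase] = "{}_{}".format(entity_type, i)
--     # Stage 3: emit in the original key order.
--     return {phrase: label[phrase] for phrase in entities}
-- ===== Notes on version B (the rewrite author's own statement) =====
-- stated objective: alternative
-- what changed: Replaces A's single pass with a running per-type counter dict by a staged build-index-then-emit structure: phrases are first grouped by type, each group is numbered once with enumerate(start=1) into a label index, and the result is emitted in the original key order.
import Mathlib
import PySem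

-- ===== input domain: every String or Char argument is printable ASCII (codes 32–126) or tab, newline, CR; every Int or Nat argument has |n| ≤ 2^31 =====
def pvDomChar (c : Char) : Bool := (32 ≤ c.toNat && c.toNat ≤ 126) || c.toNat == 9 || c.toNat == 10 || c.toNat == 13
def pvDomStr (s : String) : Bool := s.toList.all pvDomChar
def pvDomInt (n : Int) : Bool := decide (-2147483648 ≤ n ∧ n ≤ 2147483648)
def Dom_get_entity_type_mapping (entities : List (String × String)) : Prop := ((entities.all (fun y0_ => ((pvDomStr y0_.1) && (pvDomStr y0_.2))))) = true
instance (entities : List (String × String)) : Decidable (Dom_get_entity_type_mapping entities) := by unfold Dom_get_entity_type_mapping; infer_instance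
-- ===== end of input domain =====

-- B replaces A's running per-type counter with a staged build-index-then-emit structure:
-- group phrases by type, number each group once with enumerate, then emit in original key order
-- (alternative decomposition, same cost class).

-- ===== PORT A =====
def get_entity_type_mapping (entities : List (String × String)) : List (String × String) :=
  -- entity2generic_c = {v: 1 for _, v in entities.items()}
  let c0 : PySem.Dict String Int :=
    entities.foldl (fun d p => d.insert p.2 1) PySem.Dict.empty
  -- for phrase, entity_type in entities.items(): …  (state = (entity2generic, entity2generic_c))
  -- entity2generic_c[entity_type] is always present (the first pass seeded every type), so getD 0 is exact
  let st := entities.foldl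
    (fun (st : PySem.Dict String String × PySem.Dict String Int) p =>
      (st.1.insert p.1 (p.2 ++ "_" ++ PySem.Int.toStr (st.2.getD p.2 0)),
       st.2.insert p.2 (st.2.getD p.2 0 + 1)))
    (PySem.Dict.empty, c0)
  st.1.items

-- ===== PORT B =====
def get_entity_type_mapping_alt (entities : List (String × String)) : List (String × String) :=
  -- groups.setdefault(entity_type, []).append(phrase)
  let groups : PySem.Dict String (List String) :=
    entities.foldl (fun g p => g.modify p.2 [] (· ++ [p.1])) PySem.Dict.empty
  -- for entity_type, phrases in groups.items(): for i, phrase in enumerate(phrases, 1): label[phrase] = …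
  let label : PySem.Dict String String :=
    groups.items.foldl
      (fun d tp => (PySem.List.enumerate tp.2 1).foldl
        (fun d ip => d.insert ip.2 (tp.1 ++ "_" ++ PySem.Int.toStr ip.1)) d)
      PySem.Dict.empty
  -- {phrase: label[phrase] for phrase in entities}; every key of entities was labelled, so getD "" is exact
  entities.map (fun p => (p.1, label.getD p.1 ""))

-- ===== PRECONDITION & SPEC =====
-- entities is a Python dict: its keys (the phrases) are distinct; an association list with a
-- repeated key does not denote any dict input of A, so Pre_ restricts to lists modelling a dict.
def Pre_get_entity_type_mapping (entities : List (String × String)) : Prop :=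
  (entities.map Prod.fst).Nodup
instance (entities : List (String × String)) : Decidable (Pre_get_entity_type_mapping entities) := by unfold Pre_get_entity_type_mapping; infer_instance
def pvWitness_get_entity_type_mapping : (List (String × String)) :=
  [("Alice", "PERSON"), ("Bob", "PERSON"), ("Paris", "LOCATION")]

def Spec_get_entity_type_mapping (entities : List (String × String)) (out : List (String × String)) : Prop := out = get_entity_type_mapping_alt entities
instance (entities : List (String × String)) (out : List (String × String)) : Decidable (Spec_get_entity_type_mapping entities out) := by unfold Spec_get_entity_type_mapping; infer_instance

-- ===== CLAIM (what is proved, stated in full; the proofs are below) =====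
def Claim_equal_get_entity_type_mapping : Prop := ∀ (entities : List (String × String)), Dom_get_entity_type_mapping entities → Pre_get_entity_type_mapping entities → Spec_get_entity_type_mapping entities (get_entity_type_mapping entities)

-- ===== LEMMAS AND PROOFS =====

-- A's loop body, written out once so the lemmas can talk about it
def pvStepA (st : PySem.Dict String String × PySem.Dict String Int) (p : String × String) :
    PySem.Dict String String × PySem.Dict String Int :=
  (st.1.insert p.1 (p.2 ++ "_" ++ PySem.Int.toStr (st.2.getD p.2 0)),
   st.2.insert p.2 (st.2.getD p.2 0 + 1))

-- the labels A's loop produces, with the evolving counter made explicit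
def pvLabels (c : PySem.Dict String Int) : List (String × String) → List (String × String)
  | [] => []
  | p :: rest =>
      (p.1, p.2 ++ "_" ++ PySem.Int.toStr (c.getD p.2 0)) ::
        pvLabels (c.insert p.2 (c.getD p.2 0 + 1)) rest

lemma pvA_loop (l : List (String × String)) (r : PySem.Dict String String)
    (c : PySem.Dict String Int)
    (hfresh : ∀ p ∈ l, r.contains p.1 = false) (hnd : (l.map Prod.fst).Nodup) :
    (l.foldl pvStepA (r, c)).1.items = r.items ++ pvLabels c l := by
  induction l generalizing r c with
  | nil => simp [pvLabels]
  | cons p rest ih =>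
      simp only [List.foldl_cons, List.map_cons, List.nodup_cons] at *
      rw [show pvStepA (r, c) p =
        (r.insert p.1 (p.2 ++ "_" ++ PySem.Int.toStr (c.getD p.2 0)),
         c.insert p.2 (c.getD p.2 0 + 1)) from rfl]
      rw [ih _ _ ?_ hnd.2]
      · rw [PySem.Dict.items_insert_of_not_contains _ _ (hfresh p (by simp))]
        simp [pvLabels]
      · intro q hq
        rw [PySem.Dict.contains_insert]
        have : q.1 ≠ p.1 := by
          intro h; exact hnd.1 (h ▸ List.mem_map_of_mem hq)
        simp [this, hfresh q (by simp [hq])]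

lemma pvC0_getD (l : List (String × String)) (d : PySem.Dict String Int) (t : String) :
    (l.foldl (fun d p => d.insert p.2 (1 : Int)) d).getD t 0
      = if t ∈ l.map Prod.snd then 1 else d.getD t 0 := by
  induction l generalizing d with
  | nil => simp
  | cons p rest ih =>
      simp only [List.foldl_cons, List.map_cons, List.mem_cons, ih]
      rw [PySem.Dict.getD_insert]
      by_cases h1 : t ∈ rest.map Prod.snd <;> by_cases h2 : t = p.2 <;> simp [h1, h2]

lemma pvIndex_group (pre suf : List (String × String)) (p : String × String)
    (hnd : ((pre ++ p :: suf).map Prod.fst).Nodup) :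
    PySem.List.index? (((pre ++ p :: suf).filter (fun q => q.2 == p.2)).map Prod.fst) p.1
      = some ((pre.map Prod.snd).count p.2) := by
  have hnotin : p.1 ∉ (pre.map Prod.fst) := by
    simp only [List.map_append, List.map_cons, List.nodup_append] at hnd
    intro h
    exact hnd.2.2 p.1 h p.1 (List.mem_cons_self ..) rfl
  have hfc : List.filter (fun q => q.2 == p.2) (p :: suf)
      = p :: List.filter (fun q => q.2 == p.2) suf := by simp
  rw [List.filter_append, hfc, List.map_append, List.map_cons]
  rw [PySem.List.index?_eq_some_iff]
  refine ⟨(pre.filter (fun q => q.2 == p.2)).map Prod.fst, _, rfl, ?_, ?_⟩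
  · simp [List.count_eq_countP, List.countP_map, Function.comp_def,
      ← List.countP_eq_length_filter]
  · intro h
    simp only [List.mem_map, List.mem_filter] at h
    obtain ⟨q, ⟨hq, _⟩, hq1⟩ := h
    exact hnotin (List.mem_map.mpr ⟨q, hq, hq1⟩)

lemma pvLabels_eq (ent : List (String × String)) :
    ∀ (v u : List (String × String)) (c : PySem.Dict String Int), ent = u ++ v →
    (ent.map Prod.fst).Nodup →
    (∀ p ∈ v, c.getD p.2 0 = ((u.map Prod.snd).count p.2 : Int) + 1) →
    pvLabels c v = v.map (fun p =>
      (p.1, p.2 ++ "_" ++ PySem.Int.toStr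
        ((((PySem.List.index? ((ent.filter (fun q => q.2 == p.2)).map Prod.fst) p.1).getD 0 : Nat) : Int) + 1))) := by
  intro v
  induction v with
  | nil => intro u c _ _ _; simp [pvLabels]
  | cons p rest ih =>
      intro u c hent hnd hc
      have hidx := pvIndex_group u rest p (hent ▸ hnd)
      rw [← hent] at hidx
      simp only [pvLabels, List.map_cons, hidx, Option.getD_some]
      refine congrArg₂ List.cons ?_ ?_
      · exact congrArg (fun z => (p.1, p.2 ++ "_" ++ PySem.Int.toStr z)) (hc p (by simp))
      · refine ih (u ++ [p]) _ (by simp [hent]) hnd ?_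
        intro q hq
        rw [PySem.Dict.getD_insert]
        by_cases h : q.2 = p.2
        · rw [if_pos h, hc p (by simp), h]
          simp [List.count_append]
        · rw [if_neg h, hc q (by simp [hq])]
          simp [List.count_append, List.count_singleton]
          exact fun e => h e.symm

lemma pvGroups_getD (l : List (String × String)) (t : String) :
    (l.foldl (fun g p => PySem.Dict.modify g p.2 [] (· ++ [p.1])) PySem.Dict.empty).getD t []
      = (l.filter (fun q => q.2 == t)).map Prod.fst := by
  have h : l.foldl (fun g p => PySem.Dict.modify g p.2 [] (· ++ [p.1])) PySem.Dict.empty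
      = (l.map Prod.swap).foldl (fun g q => PySem.Dict.modify g q.1 [] (· ++ [q.2])) PySem.Dict.empty := by
    rw [List.foldl_map]
    rfl
  rw [h, PySem.Dict.getD_foldl_modify_append]
  simp [List.filter_map, Function.comp_def]

-- ---- B-side lemmas ----

-- lookup in a dict built by folding inserts over an association list with distinct keys
lemma pvFoldIns_skip (l : List (String × String)) (d : PySem.Dict String String) (k : String)
    (h : k ∉ l.map Prod.fst) :
    (l.foldl (fun d q => d.insert q.1 q.2) d).getD k "" = d.getD k "" := by
  induction l generalizing d with
  | nil => rfl
  | cons q rest ih =>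
      simp only [List.map_cons, List.mem_cons, not_or] at h
      simp only [List.foldl_cons]
      rw [ih _ h.2, PySem.Dict.getD_insert, if_neg h.1]

lemma pvFoldIns_mem (l : List (String × String)) (d : PySem.Dict String String)
    (k v : String) (hnd : (l.map Prod.fst).Nodup) (hm : (k, v) ∈ l) :
    (l.foldl (fun d q => d.insert q.1 q.2) d).getD k "" = v := by
  induction l generalizing d with
  | nil => cases hm
  | cons q rest ih =>
      simp only [List.map_cons, List.nodup_cons] at hnd
      rw [List.foldl_cons]
      rcases List.mem_cons.mp hm with h | h
      · subst h
        rw [pvFoldIns_skip _ _ _ hnd.1]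
        simp
      · exact ih _ hnd.2 h

-- the flattened (phrase, label) pairs B's nested loop inserts
def pvPairs (gs : List (String × List String)) : List (String × String) :=
  gs.flatMap (fun tp => (PySem.List.enumerate tp.2 1).map
    (fun ip => (ip.2, tp.1 ++ "_" ++ PySem.Int.toStr ip.1)))

lemma pvLabel_eq_foldPairs (gs : List (String × List String)) (d : PySem.Dict String String) :
    gs.foldl
      (fun d tp => (PySem.List.enumerate tp.2 1).foldl
        (fun d ip => d.insert ip.2 (tp.1 ++ "_" ++ PySem.Int.toStr ip.1)) d) d
    = (pvPairs gs).foldl (fun d q => d.insert q.1 q.2) d := by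
  induction gs generalizing d with
  | nil => rfl
  | cons tp rest ih =>
      rw [List.foldl_cons, ih]
      simp only [pvPairs, List.flatMap_cons, List.foldl_append, List.foldl_map]

lemma pvPairs_keys (gs : List (String × List String)) :
    (pvPairs gs).map Prod.fst = gs.flatMap (fun tp => tp.2) := by
  simp only [pvPairs, List.map_flatMap, List.map_map]
  congr 1
  funext tp
  exact PySem.List.map_snd_enumerate tp.2 1

-- ===== VERDICT (by name: the statement is the Claim_ definition above) =====
theorem get_entity_type_mapping_spec : Claim_equal_get_entity_type_mapping := by
  intro entities _ hpre
  unfold Spec_get_entity_type_mapping get_entity_type_mapping get_entity_type_mapping_alt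
  simp only
  rw [show (fun (st : PySem.Dict String String × PySem.Dict String Int) (p : String × String) =>
      (st.1.insert p.1 (p.2 ++ "_" ++ PySem.Int.toStr (st.2.getD p.2 0)),
       st.2.insert p.2 (st.2.getD p.2 0 + 1))) = pvStepA from rfl]
  rw [pvA_loop entities PySem.Dict.empty _ (by simp) hpre]
  rw [show (PySem.Dict.empty : PySem.Dict String String).items = [] from rfl, List.nil_append]
  rw [pvLabels_eq entities entities [] _ rfl hpre
    (by intro p hp; rw [pvC0_getD, if_pos (List.mem_map_of_mem hp)]; simp)]
  -- B side: reduce the label dict to the flattened pairs, then compare pointwise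
  set groups : PySem.Dict String (List String) :=
    entities.foldl (fun g p => g.modify p.2 [] (· ++ [p.1])) PySem.Dict.empty with hgroups
  rw [pvLabel_eq_foldPairs]
  have hgetD : ∀ t, groups.getD t [] = (entities.filter (fun q => q.2 == t)).map Prod.fst := by
    intro t; rw [hgroups]; exact pvGroups_getD entities t
  have hknd : groups.keys.Nodup := by
    rw [hgroups]
    exact PySem.Dict.nodup_keys_foldl_modify_key entities Prod.snd [] _ _ PySem.Dict.nodup_keys_empty
  have hitems : groups.items = groups.keys.map (fun t => (t, groups.getD t [])) :=
    PySem.Dict.items_eq_map_keys groups hknd []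
  -- keys of the flattened pairs: the concatenation of the (disjoint, duplicate-free) groups
  have hkeysnd : (pvPairs groups.items).map Prod.fst |>.Nodup := by
    rw [pvPairs_keys, hitems, List.flatMap_map, List.nodup_flatMap]
    constructor
    · intro t _
      show ((t, groups.getD t []).2).Nodup
      rw [hgetD]
      exact (List.Sublist.map Prod.fst (List.filter_sublist (l := entities))).nodup hpre
    · refine hknd.imp ?_
      intro t t' hne x hx hx'
      show False
      simp only [] at hx hx'
      rw [hgetD] at hx hx'
      obtain ⟨q, hq, hq1⟩ := List.mem_map.mp hx
      obtain ⟨q', hq', hq1'⟩ := List.mem_map.mp hx'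
      rw [List.mem_filter] at hq hq'
      have := List.inj_on_of_nodup_map hpre hq.1 hq'.1 (hq1.trans hq1'.symm)
      apply hne
      rw [← eq_of_beq hq.2, ← eq_of_beq hq'.2, this]
  have hmem : ∀ p ∈ entities,
      (p.1, p.2 ++ "_" ++ PySem.Int.toStr
        ((((PySem.List.index? ((entities.filter (fun q => q.2 == p.2)).map Prod.fst) p.1).getD 0 : Nat) : Int) + 1))
      ∈ pvPairs groups.items := by
    intro p hp
    obtain ⟨pre, suf, hdecomp⟩ := List.append_of_mem hp
    have hidx := pvIndex_group pre suf p (by rw [← hdecomp]; exact hpre)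
    rw [← hdecomp] at hidx
    obtain ⟨hk, hkv, -⟩ := PySem.List.getElem_of_index?_eq_some hidx
    have hkeys : p.2 ∈ groups.keys := by
      rw [hgroups, PySem.Dict.keys_foldl_modify_key]
      rw [PySem.Dict.keys_empty, PySem.Set.update_nil_left]
      exact (PySem.Set.mem_ofList _ _).mpr (List.mem_map_of_mem hp)
    refine List.mem_flatMap.mpr ⟨(p.2, groups.getD p.2 []), ?_, ?_⟩
    · rw [hitems]
      exact List.mem_map.mpr ⟨p.2, hkeys, rfl⟩
    · refine List.mem_map.mpr ⟨(1 + ((pre.map Prod.snd).count p.2 : Int), p.1), ?_, ?_⟩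
      · rw [PySem.List.mem_enumerate_iff]
        simp only [hgetD]
        exact ⟨(pre.map Prod.snd).count p.2, hk, by rw [hkv]⟩
      · rw [hidx]
        show (p.1, p.2 ++ "_" ++ PySem.Int.toStr (1 + ((pre.map Prod.snd).count p.2 : Int))) =
             (p.1, p.2 ++ "_" ++ PySem.Int.toStr ((((pre.map Prod.snd).count p.2 : Nat) : Int) + 1))
        rw [add_comm]
  refine List.map_congr_left ?_
  intro p hp
  refine Prod.ext rfl ?_
  exact (pvFoldIns_mem _ _ _ _ hkeysnd (hmem p hp)).symm
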